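-- pv_equiv track=rewrite | github.com/NicholasAronow/Dynamic-Pricing-Full-App-2 | Adaptiv/backend/dynamic_pricing_agents/agents/market_analysis.py | _get_historical_seasonal_patterns
-- ===== SOURCE A (Python) =====
-- from typing import Dict, Any, List, Optional
--
-- def _get_historical_seasonal_patterns(seasonal_memories: List[Dict]) -> List[str]:
--     """Extract historical seasonal patterns"""
--     all_patterns = []
--     for memory in seasonal_memories:
--         patterns = memory.get('content', {}).get('patterns', [])
--         all_patterns.extend(patterns)
--
--     # Return unique patterns that appear multiple times
--     from collections import Counter
--     pattern_counts = Counter(all_patterns)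
--     return [pattern for pattern, count in pattern_counts.items() if count >= 2]
-- ===== SOURCE B (Python) =====
-- def _get_historical_seasonal_patterns(seasonal_memories):
--     """Extract historical seasonal patterns: a pattern is reported at its first
--     occurrence iff it occurs again later (no counting structures at all)."""
--     flat = [p for memory in seasonal_memories
--               for p in memory.get('content', {}).get('patterns', [])]
--     return [p for i, p in enumerate(flat)
--               if p not in flat[:i] and p in flat[i + 1:]]
-- ===== Notes on version B (the rewrite author's own statement) =====
-- stated objective: alternative
-- what changed: Replaces the Counter count-then-filter with a single slice-based comprehension: each pattern is emitted at its first occurrence iff it reappears in the remaining suffix (p not in flat[:i] and p in flat[i+1:]), so no count dictionary or auxiliary set is built.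
import Mathlib
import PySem

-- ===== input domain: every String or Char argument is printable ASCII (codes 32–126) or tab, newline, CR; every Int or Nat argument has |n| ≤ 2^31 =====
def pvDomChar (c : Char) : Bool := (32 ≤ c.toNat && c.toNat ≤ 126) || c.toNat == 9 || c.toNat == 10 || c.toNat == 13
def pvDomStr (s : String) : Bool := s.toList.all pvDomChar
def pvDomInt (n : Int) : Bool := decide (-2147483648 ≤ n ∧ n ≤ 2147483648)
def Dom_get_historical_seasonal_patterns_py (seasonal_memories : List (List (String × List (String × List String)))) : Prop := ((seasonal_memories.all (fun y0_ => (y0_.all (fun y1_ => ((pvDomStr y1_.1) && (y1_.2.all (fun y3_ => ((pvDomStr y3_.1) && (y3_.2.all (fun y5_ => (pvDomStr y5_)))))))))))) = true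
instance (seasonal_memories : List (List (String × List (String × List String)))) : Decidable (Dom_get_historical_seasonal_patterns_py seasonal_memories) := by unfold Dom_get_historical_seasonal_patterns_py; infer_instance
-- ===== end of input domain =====

-- B replaces the Counter count-then-filter with a single slice-based comprehension: emit each
-- pattern at its first occurrence iff it reappears later (p not in flat[:i] and p in flat[i+1:]).
-- Alternative decomposition; no count dictionary or auxiliary set is built (B is quadratic).

-- ===== PORT A =====
-- memory.get('content', {}).get('patterns', [])
def pvPatterns (memory : List (String × List (String × List String))) : List String :=
  PySem.Dict.getD (PySem.Dict.mk (PySem.Dict.getD (PySem.Dict.mk memory) "content" [])) "patterns" []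

def get_historical_seasonal_patterns_py (seasonal_memories : List (List (String × List (String × List String)))) : List String :=
  let all_patterns := seasonal_memories.foldl (fun acc memory => acc ++ pvPatterns memory) []
  let pattern_counts := PySem.Dict.counter all_patterns
  pattern_counts.items.foldl (fun acc pc => if (2 : Int) ≤ pc.2 then acc ++ [pc.1] else acc) []

-- ===== PORT B =====
def get_historical_seasonal_patterns_py_alt (seasonal_memories : List (List (String × List (String × List String)))) : List String :=
  let flat := seasonal_memories.flatMap (fun memory => pvPatterns memory)
  (PySem.List.enumerate flat).filterMap (fun ip =>
    if ip.2 ∉ PySem.List.slice flat none (some ip.1) ∧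
       ip.2 ∈ PySem.List.slice flat (some (ip.1 + 1)) none
    then some ip.2 else none)

-- ===== PRECONDITION & SPEC =====
-- Pre_ excludes association lists that encode no Python dict: within each memory the keys must be
-- distinct, and so must the keys of its "content" entry (the only nested dict A reads); on a
-- duplicate key the first-match lookup order is an artefact of the encoding, not of A.
def Pre_get_historical_seasonal_patterns_py (seasonal_memories : List (List (String × List (String × List String)))) : Prop :=
  ∀ m ∈ seasonal_memories,
    (m.map Prod.fst).Nodup ∧
    (((PySem.Dict.getD (PySem.Dict.mk m) "content" []).map Prod.fst).Nodup)
instance (seasonal_memories : List (List (String × List (String × List String)))) : Decidable (Pre_get_historical_seasonal_patterns_py seasonal_memories) := by unfold Pre_get_historical_seasonal_patterns_py; infer_instance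

def pvWitness_get_historical_seasonal_patterns_py : (List (List (String × List (String × List String)))) :=
  [[("content", [("patterns", ["winter slump", "holiday rush"])])],
   [("content", [("patterns", ["winter slump"])]), ("note", [])]]

def Spec_get_historical_seasonal_patterns_py (seasonal_memories : List (List (String × List (String × List String)))) (out : List String) : Prop := out = get_historical_seasonal_patterns_py_alt seasonal_memories
instance (seasonal_memories : List (List (String × List (String × List String)))) (out : List String) : Decidable (Spec_get_historical_seasonal_patterns_py seasonal_memories out) := by unfold Spec_get_historical_seasonal_patterns_py; infer_instance

-- ===== CLAIM (what is proved, stated in full; the proofs are below) =====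
def Claim_equal_get_historical_seasonal_patterns_py : Prop := ∀ (seasonal_memories : List (List (String × List (String × List String)))), Dom_get_historical_seasonal_patterns_py seasonal_memories → Pre_get_historical_seasonal_patterns_py seasonal_memories → Spec_get_historical_seasonal_patterns_py seasonal_memories (get_historical_seasonal_patterns_py seasonal_memories)

-- ===== LEMMAS AND PROOFS =====

-- emit p at its first not-yet-emitted occurrence when cond p holds
def pvGo (cond : String → Bool) : List String → PySem.Set String → List String
  | [], _ => []
  | p :: r, em =>
    if cond p && !(PySem.Set.contains em p) then p :: pvGo cond r (PySem.Set.add em p)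
    else pvGo cond r em

theorem pvGo_congr (c₁ c₂ : String → Bool) (h : ∀ p, c₁ p = c₂ p) :
    ∀ (xs : List String) (em : PySem.Set String), pvGo c₁ xs em = pvGo c₂ xs em := by
  intro xs
  induction xs with
  | nil => intro em; rfl
  | cons p r ih => intro em; simp only [pvGo, h p]; split <;> simp [ih]

theorem pvGoFilter (cond : String → Bool) :
    ∀ (xs : List String) (s em : PySem.Set String),
      (∀ p, cond p = true → (p ∈ s ↔ p ∈ em)) →
      (PySem.Set.update s xs).filter cond = s.filter cond ++ pvGo cond xs em := by
  intro xs
  induction xs with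
  | nil => intro s em _; simp [PySem.Set.update, pvGo]
  | cons x r ih =>
    intro s em h
    rw [PySem.Set.update_cons, pvGo]
    by_cases hc : cond x = true
    · by_cases hem : PySem.Set.contains em x = true
      · have hxem : x ∈ em := (PySem.Set.contains_iff em x).1 hem
        have hxs : x ∈ s := (h x hc).2 hxem
        have hadd : PySem.Set.add s x = s := by
          simp [PySem.Set.add, hxs]
        simp only [hc, hem, Bool.not_true, Bool.and_false, if_neg, Bool.false_eq_true, not_false_iff]
        rw [hadd, ih s em h]
      · have hxem : x ∉ em := fun hm => hem ((PySem.Set.contains_iff em x).2 hm)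
        have hxs : x ∉ s := fun hm => hxem ((h x hc).1 hm)
        have hadd : PySem.Set.add s x = s ++ [x] := by
          simp [PySem.Set.add, hxs]
        simp only [hc, hem, Bool.not_false, Bool.and_true, if_pos]
        rw [hadd, ih (s ++ [x]) (PySem.Set.add em x) ?_]
        · rw [List.filter_append, List.filter_cons, hc]
          simp
        · intro p hp
          rw [List.mem_append, List.mem_singleton, PySem.Set.mem_add]
          exact or_congr (h p hp) Iff.rfl
    · have hcf : cond x = false := by revert hc; cases cond x <;> simp
      simp only [hcf, Bool.false_and, if_neg, Bool.false_eq_true, not_false_iff]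
      have hfa : (PySem.Set.add s x).filter cond = s.filter cond := by
        simp only [PySem.Set.add]
        split
        · rfl
        · simp [List.filter_append, hcf]
      rw [ih (PySem.Set.add s x) em ?_, hfa]
      intro p hp
      rw [PySem.Set.mem_add]
      have hpx : p ≠ x := fun he => by rw [he, hcf] at hp; exact Bool.false_ne_true hp
      constructor
      · rintro (hm | he)
        · exact (h p hp).1 hm
        · exact absurd he hpx
      · intro hm; exact Or.inl ((h p hp).2 hm)

-- the value of B's comprehension as a structural recursion: scanned prefix + remaining suffix
def pvSel : List String → List String → List String
  | _, [] => []
  | pre, p :: r => if p ∉ pre ∧ p ∈ r then p :: pvSel (pre ++ [p]) r else pvSel (pre ++ [p]) r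

theorem pvSel_eq_filterMap (flat : List String) :
    ∀ (xs pre : List String), pre ++ xs = flat →
      (PySem.List.enumerate xs (pre.length : Int)).filterMap (fun ip =>
        if ip.2 ∉ PySem.List.slice flat none (some ip.1) ∧
           ip.2 ∈ PySem.List.slice flat (some (ip.1 + 1)) none
        then some ip.2 else none) = pvSel pre xs := by
  intro xs
  induction xs with
  | nil => intro pre _; simp [PySem.List.enumerate, pvSel]
  | cons p r ih =>
    intro pre hsplit
    rw [PySem.List.enumerate_cons, List.filterMap_cons]
    have h1 : PySem.List.slice flat none (some (pre.length : Int)) = pre := by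
      rw [PySem.List.slice_to_natCast, ← hsplit, List.take_left]
    have h2 : PySem.List.slice flat (some ((pre.length : Int) + 1)) none = r := by
      have hc : ((pre.length : Int) + 1) = ((pre.length + 1 : Nat) : Int) := by push_cast; ring
      rw [hc, PySem.List.slice_from_natCast, ← hsplit]
      have he : pre ++ p :: r = (pre ++ [p]) ++ r := by simp
      rw [he]
      have hlen : pre.length + 1 = (pre ++ [p]).length := by simp
      rw [hlen, List.drop_left]
    simp only [h1, h2]
    have hstart : (pre.length : Int) + 1 = (((pre ++ [p]).length : Nat) : Int) := by
      simp
    have hrec := ih (pre ++ [p]) (by simpa using hsplit)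
    rw [hstart, hrec, pvSel]
    by_cases hcond : p ∉ pre ∧ p ∈ r
    · rw [if_pos hcond, if_pos hcond]
    · rw [if_neg hcond, if_neg hcond]

theorem pvGo_em_congr (cond : String → Bool) :
    ∀ (xs : List String) (em₁ em₂ : PySem.Set String),
      (∀ q, q ∈ xs → (q ∈ em₁ ↔ q ∈ em₂)) → pvGo cond xs em₁ = pvGo cond xs em₂ := by
  intro xs
  induction xs with
  | nil => intro _ _ _; rfl
  | cons p r ih =>
    intro em₁ em₂ h
    have hpiff := h p (List.mem_cons_self)
    have hcont : PySem.Set.contains em₁ p = PySem.Set.contains em₂ p := by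
      have h1 := PySem.Set.contains_iff em₁ p
      have h2 := PySem.Set.contains_iff em₂ p
      by_cases hm : p ∈ em₁
      · rw [h1.2 hm, h2.2 (hpiff.1 hm)]
      · have hm2 : p ∉ em₂ := fun hh => hm (hpiff.2 hh)
        cases hb1 : PySem.Set.contains em₁ p
        · cases hb2 : PySem.Set.contains em₂ p
          · rfl
          · exact absurd (h2.1 hb2) hm2
        · exact absurd (h1.1 hb1) hm
    have hrest : ∀ q, q ∈ r → (q ∈ PySem.Set.add em₁ p ↔ q ∈ PySem.Set.add em₂ p) := by
      intro q hq
      rw [PySem.Set.mem_add, PySem.Set.mem_add]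
      exact or_congr (h q (List.mem_cons_of_mem _ hq)) Iff.rfl
    have hrest' : ∀ q, q ∈ r → (q ∈ em₁ ↔ q ∈ em₂) := fun q hq => h q (List.mem_cons_of_mem _ hq)
    rw [pvGo, pvGo, hcont]
    split
    · rw [ih _ _ hrest]
    · rw [ih _ _ hrest']

theorem pvSel_eq_pvGo (flat : List String) :
    ∀ (xs pre : List String) (em : PySem.Set String), pre ++ xs = flat →
      (∀ q, q ∈ pre ↔ q ∈ em) →
      pvSel pre xs = pvGo (fun p => decide (2 ≤ flat.count p)) xs em := by
  intro xs
  induction xs with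
  | nil => intro pre em _ _; rfl
  | cons p r ih =>
    intro pre em hsplit hmem
    have hmem' : ∀ q, q ∈ pre ++ [p] ↔ q ∈ PySem.Set.add em p := by
      intro q
      rw [List.mem_append, List.mem_singleton, PySem.Set.mem_add]
      exact or_congr (hmem q) Iff.rfl
    have hrec := ih (pre ++ [p]) (PySem.Set.add em p) (by simpa using hsplit) hmem'
    have hcount : flat.count p = pre.count p + 1 + r.count p := by
      rw [← hsplit, List.count_append, List.count_cons_self]
      ring
    rw [pvSel, pvGo]
    by_cases hp : p ∈ pre
    · have hem : PySem.Set.contains em p = true := (PySem.Set.contains_iff em p).2 ((hmem p).1 hp)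
      have hadd : PySem.Set.add em p = em := by
        simp [PySem.Set.add, (PySem.Set.contains_iff em p).1 hem]
      rw [hadd] at hrec
      rw [if_neg (by tauto), hem, hrec]
      simp
    · have hpem : p ∉ em := fun h => hp ((hmem p).2 h)
      have hem : PySem.Set.contains em p = false := by
        revert hpem
        rw [← PySem.Set.contains_iff]
        cases PySem.Set.contains em p <;> simp
      have hpc : pre.count p = 0 := List.count_eq_zero.2 hp
      rw [hem]
      by_cases hr : p ∈ r
      · have hc : (2 ≤ flat.count p) := by
          have := List.count_pos_iff.2 hr
          omega
        rw [if_pos ⟨hp, hr⟩, hrec]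
        simp [hc]
      · have hc : ¬ (2 ≤ flat.count p) := by
          have : r.count p = 0 := List.count_eq_zero.2 hr
          omega
        rw [if_neg (by tauto), hrec,
          pvGo_em_congr _ r (PySem.Set.add em p) em (fun q hq => by
            rw [PySem.Set.mem_add]
            exact ⟨fun h => h.elim id (fun he => absurd (he ▸ hq) hr), Or.inl⟩)]
        simp [hc]

-- ===== VERDICT (by name: the statement is the Claim_ definition above) =====
theorem get_historical_seasonal_patterns_py_spec : Claim_equal_get_historical_seasonal_patterns_py := by
  intro sm _ _
  unfold Spec_get_historical_seasonal_patterns_py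
  unfold get_historical_seasonal_patterns_py get_historical_seasonal_patterns_py_alt
  rw [PySem.List.foldl_append_eq_flatMap]
  set flat := sm.flatMap (fun memory => pvPatterns memory) with hflat
  simp only [List.nil_append]
  -- A's side: items of the counter, filtered
  have hA : (PySem.Dict.counter flat).items.foldl
      (fun acc pc => if (2 : Int) ≤ pc.2 then acc ++ [pc.1] else acc) []
      = (PySem.Set.ofList flat).filter (fun k => decide ((2:Int) ≤ (flat.count k : Int))) := by
    rw [PySem.List.foldl_append_ite (fun pc => (2:Int) ≤ pc.2) Prod.fst, PySem.Dict.items_counter]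
    rw [List.filter_map, List.map_map]
    simp [Function.comp_def]
  have hGoA : (PySem.Set.ofList flat).filter (fun k => decide ((2:Int) ≤ (flat.count k : Int)))
      = pvGo (fun k => decide ((2:Int) ≤ (flat.count k : Int))) flat PySem.Set.empty := by
    have := pvGoFilter (fun k => decide ((2:Int) ≤ (flat.count k : Int))) flat [] []
      (fun p _ => Iff.rfl)
    rw [PySem.Set.update_nil_left] at this
    simpa [PySem.Set.empty] using this
  -- B's side: the comprehension is pvSel [] flat, which is pvGo over the Nat-count condition
  have hB : (PySem.List.enumerate flat).filterMap (fun ip =>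
      if ip.2 ∉ PySem.List.slice flat none (some ip.1) ∧
         ip.2 ∈ PySem.List.slice flat (some (ip.1 + 1)) none
      then some ip.2 else none) = pvSel [] flat := by
    have := pvSel_eq_filterMap flat flat [] (by simp)
    simpa [PySem.List.enumerate] using this
  have hSel : pvSel [] flat = pvGo (fun p => decide (2 ≤ flat.count p)) flat PySem.Set.empty :=
    pvSel_eq_pvGo flat flat [] PySem.Set.empty (by simp) (by simp [PySem.Set.empty])
  rw [hA, hGoA, hB, hSel]
  exact pvGo_congr _ _ (fun p => decide_eq_decide.mpr (by omega)) flat PySem.Set.empty
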